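-- pv_equiv track=rewrite | github.com/jpibz/couch | src/bash_tool/execute_unix_single_command.py | _needs_powershell
-- ===== SOURCE A (Python) =====
-- def _needs_powershell(command: str) -> bool:
--     """
--     Detect if command needs PowerShell instead of cmd.exe.
--
--     PowerShell required for:
--     - Command substitution: $(...)
--     - Backticks: `...`
--     - Process substitution: <(...)
--     - Complex variable expansion
--
--     Returns:
--         True if PowerShell required, False if cmd.exe sufficient
--     """
--     # Command substitution patterns
--     if '$(' in command:
--         return True
--
--     # Backtick command substitution
--     if '`' in command:
--         # Check it's not just in a string
--         # Simple heuristic: backticks outside of quotes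
--         in_quotes = False
--         quote_char = None
--         for i, char in enumerate(command):
--             if char in ('"', "'") and (i == 0 or command[i-1] != '\\'):
--                 if not in_quotes:
--                     in_quotes = True
--                     quote_char = char
--                 elif char == quote_char:
--                     in_quotes = False
--                     quote_char = None
--             elif char == '`' and not in_quotes:
--                 return True
--
--     # Process substitution
--     if '<(' in command or '>(' in command:
--         return True
--
--     return False
-- ===== SOURCE B (Python) =====
-- def _split_close(q, quotes):
--     # first unescaped quote with the same char: its position and the remaining quotes
--     for j, (p, c) in enumerate(quotes):
--         if c == q:
--             return p, quotes[j + 1:]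
--     return None
--
--
-- def _needs_powershell(command: str) -> bool:
--     # Interval algorithm: pair up the unescaped quotes into quoted spans once,
--     # then ask whether some backtick position lies outside every span.
--     if '$(' in command or '<(' in command or '>(' in command:
--         return True
--     quotes = [(i, c) for i, c in enumerate(command)
--               if c in ('"', "'") and (i == 0 or command[i - 1] != '\\')]
--     ticks = [i for i, c in enumerate(command) if c == '`']
--     spans = []
--     while quotes:
--         (start, q), quotes = quotes[0], quotes[1:]
--         hit = _split_close(q, quotes)
--         if hit is None:
--             spans.append((start, len(command)))
--             quotes = []
--         else:
--             close, quotes = hit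
--             spans.append((start, close))
--     return any(all(not (a < t < b) for a, b in spans) for t in ticks)
-- ===== Notes on version B (the rewrite author's own statement) =====
-- stated objective: alternative
-- what changed: Replaces A's fused early-return quote-tracking state machine with an interval algorithm: collect the positions of backticks and of unescaped quotes, pair the quotes into quoted spans (opener + next same-char unescaped quote, or end of string), and answer by testing whether some backtick position lies outside every span; the substring checks stay plain short-circuits.
import Mathlib
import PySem

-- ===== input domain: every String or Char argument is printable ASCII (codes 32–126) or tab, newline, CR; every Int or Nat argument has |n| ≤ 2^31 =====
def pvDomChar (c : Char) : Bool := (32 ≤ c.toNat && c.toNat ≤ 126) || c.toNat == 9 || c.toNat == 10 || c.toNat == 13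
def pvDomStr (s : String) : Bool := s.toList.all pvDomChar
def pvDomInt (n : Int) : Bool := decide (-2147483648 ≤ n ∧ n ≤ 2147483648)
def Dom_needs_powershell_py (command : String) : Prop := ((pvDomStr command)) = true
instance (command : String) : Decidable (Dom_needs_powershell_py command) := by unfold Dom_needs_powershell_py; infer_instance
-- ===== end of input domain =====

-- B replaces A's fused early-return quote-tracking state machine with an interval
-- algorithm (pair the unescaped quotes into quoted spans, then test whether some
-- backtick position lies outside every span); alternative structure, same result.

-- ===== PORT A =====
-- the early-return for-loop of A's backtick heuristic, state (in_quotes, quote_char)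
def pvALoop (cmd : List Char) (pairs : List (Int × Char)) (inq : Bool) (qc : Option Char) : Bool :=
  match pairs with
  | [] => false
  | (i, c) :: rest =>
    if (c == '"' || c == '\'') && (i == 0 || PySem.List.pyGet? cmd (i - 1) != some '\\') then
      if !inq then pvALoop cmd rest true (some c)
      else if some c == qc then pvALoop cmd rest false none
      else pvALoop cmd rest inq qc
    else if c == '`' && !inq then true
    else pvALoop cmd rest inq qc

def needs_powershell_py (command : String) : Bool :=
  if PySem.Str.isIn "$(" command then true
  else if PySem.Str.isIn "`" command then
    if pvALoop command.toList (PySem.List.enumerate command.toList) false none then true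
    else PySem.Str.isIn "<(" command || PySem.Str.isIn ">(" command
  else PySem.Str.isIn "<(" command || PySem.Str.isIn ">(" command

-- ===== PORT B =====
-- _split_close: position of the first same-char quote and the remaining quotes
def pvSplitClose (q : Char) : List (Int × Char) → Option (Int × List (Int × Char))
  | [] => none
  | (p, c) :: rest => if c == q then some (p, rest) else pvSplitClose q rest

-- needed by pvBSpans's termination argument
theorem pvSplitClose_length_lt (q : Char) :
    ∀ (l : List (Int × Char)) (c : Int) (r : List (Int × Char)),
      pvSplitClose q l = some (c, r) → r.length < l.length := by
  intro l
  induction l with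
  | nil => intro c r h; simp [pvSplitClose] at h
  | cons p rest ih =>
    intro c r h
    obtain ⟨pi, pc⟩ := p
    simp only [pvSplitClose] at h
    split_ifs at h with hc
    · cases h; simp
    · exact Nat.lt_succ_of_lt (ih c r h)

-- the while-loop of B pairing the quote list into spans
def pvBSpans (n : Int) : List (Int × Char) → List (Int × Int)
  | [] => []
  | (start, q) :: rest =>
    match h : pvSplitClose q rest with
    | none => [(start, n)]
    | some (close, rest') => (start, close) :: pvBSpans n rest'
  termination_by l => l.length
  decreasing_by
    simp only [List.length_cons]
    exact Nat.lt_succ_of_lt (pvSplitClose_length_lt q rest close rest' h)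

-- the quotes comprehension of B
def pvQuotesOf (cmd : List Char) (pairs : List (Int × Char)) : List (Int × Char) :=
  pairs.filter (fun p =>
    (p.2 == '"' || p.2 == '\'') && (p.1 == 0 || PySem.List.pyGet? cmd (p.1 - 1) != some '\\'))

-- the ticks comprehension of B
def pvTicksOf (pairs : List (Int × Char)) : List Int :=
  (pairs.filter (fun p => p.2 == '`')).map (·.1)

-- the inner all(...) of B: t lies outside every span
def pvAllOut (n : Int) (qs : List (Int × Char)) (t : Int) : Bool :=
  (pvBSpans n qs).all (fun ab => !(decide (ab.1 < t ∧ t < ab.2)))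

def needs_powershell_py_alt (command : String) : Bool :=
  if PySem.Str.isIn "$(" command || PySem.Str.isIn "<(" command || PySem.Str.isIn ">(" command then
    true
  else
    (pvTicksOf (PySem.List.enumerate command.toList)).any
      (fun t => pvAllOut (command.toList.length : Int)
        (pvQuotesOf command.toList (PySem.List.enumerate command.toList)) t)

-- ===== PRECONDITION & SPEC =====
def Spec_needs_powershell_py (command : String) (out : Bool) : Prop := out = needs_powershell_py_alt command
instance (command : String) (out : Bool) : Decidable (Spec_needs_powershell_py command out) := by unfold Spec_needs_powershell_py; infer_instance

-- ===== CLAIM (what is proved, stated in full; the proofs are below) =====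
def Claim_equal_needs_powershell_py : Prop := ∀ (command : String), Dom_needs_powershell_py command → Spec_needs_powershell_py command (needs_powershell_py command)

-- ===== LEMMAS AND PROOFS =====

-- two elements of a fst-strictly-increasing list with equal fst are equal
theorem pv_fst_inj_of_pairwise {l : List (Int × Char)}
    (hp : l.Pairwise (fun p q => p.1 < q.1)) {p r : Int × Char}
    (hpl : p ∈ l) (hrl : r ∈ l) (h : p.1 = r.1) : p = r := by
  induction l with
  | nil => simp at hpl
  | cons x xs ih =>
    rcases List.pairwise_cons.mp hp with ⟨hx, hxs⟩
    rcases List.mem_cons.mp hpl with hpx | hpm <;> rcases List.mem_cons.mp hrl with hrx | hrm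
    · rw [hpx, hrx]
    · exfalso; have := hx r hrm; rw [hpx] at h; omega
    · exfalso; have := hx p hpm; rw [hrx] at h; omega
    · exact ih hxs hpm hrm

theorem pvSplitClose_mem (q : Char) :
    ∀ (l : List (Int × Char)) (c : Int) (r : List (Int × Char)),
      pvSplitClose q l = some (c, r) → (c, q) ∈ l ∧ r ⊆ l := by
  intro l
  induction l with
  | nil => intro c r h; simp [pvSplitClose] at h
  | cons p rest ih =>
    intro c r h
    obtain ⟨pi, pc⟩ := p
    simp only [pvSplitClose] at h
    split_ifs at h with hc
    · cases h
      exact ⟨by simp [beq_iff_eq.mp hc], fun x hx => List.mem_cons_of_mem _ hx⟩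
    · obtain ⟨hm, hs⟩ := ih c r h
      exact ⟨List.mem_cons_of_mem _ hm, fun x hx => List.mem_cons_of_mem _ (hs hx)⟩

-- every span start is the position of a quote in the list
-- unfolding equations for the span builder
theorem pvBSpans_cons_none (n start : Int) (q : Char) (rest : List (Int × Char))
    (h : pvSplitClose q rest = none) :
    pvBSpans n ((start, q) :: rest) = [(start, n)] := by
  rw [pvBSpans.eq_def]
  split
  · next heq => simp at heq
  · next heq =>
      cases heq
      split
      · rfl
      · next heq2 => rw [h] at heq2; cases heq2

theorem pvBSpans_cons_some (n start : Int) (q : Char) (rest : List (Int × Char))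
    (close : Int) (rest' : List (Int × Char))
    (h : pvSplitClose q rest = some (close, rest')) :
    pvBSpans n ((start, q) :: rest) = (start, close) :: pvBSpans n rest' := by
  rw [pvBSpans.eq_def]
  split
  · next heq => simp at heq
  · next heq =>
      cases heq
      split
      · next heq2 => rw [h] at heq2; cases heq2
      · next heq2 => rw [h] at heq2; cases heq2; rfl

theorem pvBSpans_start_mem (n : Int) :
    ∀ (qs : List (Int × Char)) (ab : Int × Int),
      ab ∈ pvBSpans n qs → ∃ p ∈ qs, p.1 = ab.1 := by
  intro qs
  induction qs using pvBSpans.induct with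
  | case1 => intro ab h; rw [pvBSpans.eq_def] at h; simp at h
  | case2 start q rest h =>
    intro ab hab
    rw [pvBSpans_cons_none n start q rest h] at hab
    rcases List.mem_singleton.mp hab with rfl
    exact ⟨(start, q), List.mem_cons_self, rfl⟩
  | case3 start q rest close rest' h ih =>
    intro ab hab
    rw [pvBSpans_cons_some n start q rest close rest' h] at hab
    rcases List.mem_cons.mp hab with rfl | hm
    · exact ⟨(start, q), List.mem_cons_self, rfl⟩
    · obtain ⟨p, hp, hfst⟩ := ih ab hm
      exact ⟨p, List.mem_cons_of_mem _ ((pvSplitClose_mem q rest close rest' h).2 hp), hfst⟩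

-- any-congruence on members (List.any_congr needs pointwise equality everywhere)
theorem pv_any_congr {α : Type} {l : List α} {f g : α → Bool}
    (h : ∀ x ∈ l, f x = g x) : l.any f = l.any g := by
  induction l with
  | nil => rfl
  | cons x xs ih =>
    simp only [List.any_cons, h x List.mem_cons_self,
      ih fun y hy => h y (List.mem_cons_of_mem _ hy)]

-- a position left of every quote lies outside every span
theorem pvAllOut_of_lt (n : Int) (qs : List (Int × Char)) (i : Int)
    (h : ∀ p ∈ qs, i < p.1) : pvAllOut n qs i = true := by
  rw [pvAllOut, List.all_eq_true]
  intro ab hab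
  obtain ⟨p, hp, hfst⟩ := pvBSpans_start_mem n qs ab hab
  have := h p hp
  simp only [Bool.not_eq_eq_eq_not, Bool.not_true, decide_eq_false_iff_not]
  omega

-- membership in the ticks list
theorem pv_mem_ticks {pairs : List (Int × Char)} {t : Int} :
    t ∈ pvTicksOf pairs ↔ ∃ p ∈ pairs, p.2 = '`' ∧ p.1 = t := by
  simp only [pvTicksOf, List.mem_map, List.mem_filter, beq_iff_eq]
  constructor
  · rintro ⟨p, ⟨hp, hc⟩, ht⟩; exact ⟨p, hp, hc, ht⟩
  · rintro ⟨p, hp, hc, ht⟩; exact ⟨p, ⟨hp, hc⟩, ht⟩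

-- THE MAIN INVARIANT: A's scan from either state equals B's span test
theorem pvMain (cmd : List Char) (n : Int) :
    ∀ (pairs : List (Int × Char)),
      pairs.Pairwise (fun p q => p.1 < q.1) →
      (∀ p ∈ pairs, p.1 < n) →
      (pvALoop cmd pairs false none
         = (pvTicksOf pairs).any (fun t => pvAllOut n (pvQuotesOf cmd pairs) t))
      ∧ (∀ q : Char,
          pvALoop cmd pairs true (some q)
            = match pvSplitClose q (pvQuotesOf cmd pairs) with
              | none => false
              | some (close, qr) =>
                  (pvTicksOf pairs).any (fun t => decide (close < t) && pvAllOut n qr t)) := by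
  intro pairs
  induction pairs with
  | nil =>
    intro _ _
    constructor
    · simp [pvALoop, pvTicksOf, pvQuotesOf]
    · intro q; simp [pvALoop, pvQuotesOf, pvSplitClose]
  | cons hd rest ih =>
    intro hp hb
    obtain ⟨i, c⟩ := hd
    rcases List.pairwise_cons.mp hp with ⟨hlt, hp'⟩
    have hb' : ∀ p ∈ rest, p.1 < n := fun p hm => hb p (List.mem_cons_of_mem _ hm)
    obtain ⟨ihA, ihB⟩ := ih hp' hb'
    have hticklt : ∀ t ∈ pvTicksOf rest, i < t := by
      intro t ht
      obtain ⟨p, hpm, _, hfst⟩ := pv_mem_ticks.mp ht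
      have := hlt p hpm; omega
    have htickn : ∀ t ∈ pvTicksOf rest, t < n := by
      intro t ht
      obtain ⟨p, hpm, _, hfst⟩ := pv_mem_ticks.mp ht
      have := hb' p hpm; omega
    by_cases hq : ((c == '"' || c == '\'') && ((i : Int) == 0 || PySem.List.pyGet? cmd (i - 1) != some '\\')) = true
    · -- head is an unescaped quote
      have hcq : c = '"' ∨ c = '\'' := by
        by_contra hno
        push Not at hno
        simp [hno.1, hno.2] at hq
      have hctick : ¬ (c = '`') := by rcases hcq with rfl | rfl <;> decide
      have hQ : pvQuotesOf cmd ((i, c) :: rest) = (i, c) :: pvQuotesOf cmd rest := by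
        simp [pvQuotesOf, hq]
      have hT : pvTicksOf ((i, c) :: rest) = pvTicksOf rest := by
        simp [pvTicksOf, hctick]
      constructor
      · -- state false: open a quote
        show pvALoop cmd ((i, c) :: rest) false none = _
        rw [pvALoop]
        simp only [hq, if_true, Bool.not_false]
        rw [hQ, hT, ihB c]
        cases hsc : pvSplitClose c (pvQuotesOf cmd rest) with
        | none =>
          simp only []
          symm
          rw [List.any_eq_false]
          intro t ht
          have h1 := hticklt t ht
          have h2 := htickn t ht
          simp only [pvAllOut]
          rw [pvBSpans_cons_none _ _ _ _ hsc]
          simp only [List.all_cons, List.all_nil, Bool.and_true,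
            Bool.not_eq_eq_eq_not, Bool.not_true, decide_eq_false_iff_not]
          omega
        | some cr =>
          obtain ⟨close, qr⟩ := cr
          simp only []
          have hclosem : (close, c) ∈ pvQuotesOf cmd rest := (pvSplitClose_mem c _ _ _ hsc).1
          have hclosem' : (close, c) ∈ rest := List.mem_of_mem_filter hclosem
          apply pv_any_congr
          intro t ht
          have hit : i < t := hticklt t ht
          have htc : t ≠ close := by
            intro h
            obtain ⟨p, hpm, hptick, hpfst⟩ := pv_mem_ticks.mp ht
            have : p = (close, c) := pv_fst_inj_of_pairwise hp' hpm hclosem' (by omega)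
            rw [this] at hptick
            simp at hptick
            exact hctick hptick
          simp only [pvAllOut]
          rw [pvBSpans_cons_some _ _ _ _ _ _ hsc]
          simp only [List.all_cons]
          have hfac : (!(decide ((i, close).1 < t ∧ t < (i, close).2))) = decide (close < t) := by
            simp only []
            rcases lt_trichotomy t close with h | h | h
            · rw [decide_eq_true (⟨hit, h⟩ : i < t ∧ t < close),
                decide_eq_false (by omega : ¬ close < t)]
              rfl
            · exact absurd h htc
            · rw [decide_eq_false (by omega : ¬ (i < t ∧ t < close)), decide_eq_true h]
              rfl
          rw [hfac]
      · -- state true (some q): maybe close the quote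
        intro q
        show pvALoop cmd ((i, c) :: rest) true (some q) = _
        rw [pvALoop]
        simp only [hq, if_true, Bool.not_true, Bool.false_eq_true, if_false]
        rw [hQ, hT]
        by_cases hcq2 : c = q
        · subst hcq2
          simp only [beq_self_eq_true, if_true]
          rw [pvSplitClose]
          simp only [beq_self_eq_true, if_true, ihA]
          apply pv_any_congr
          intro t ht
          have : decide (i < t) = true := decide_eq_true (hticklt t ht)
          rw [this, Bool.true_and]
        · have : (some c == some q) = false := by
            simpa [beq_iff_eq] using hcq2
          simp only [this, Bool.false_eq_true, if_false]
          rw [pvSplitClose]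
          have : (c == q) = false := beq_eq_false_iff_ne.mpr hcq2
          simp only [this, Bool.false_eq_true, if_false]
          exact ihB q
    · -- head is not an unescaped quote
      have hq' : ((c == '"' || c == '\'') && ((i : Int) == 0 || PySem.List.pyGet? cmd (i - 1) != some '\\')) = false :=
        Bool.not_eq_true _ ▸ (by simpa using hq)
      have hQ : pvQuotesOf cmd ((i, c) :: rest) = pvQuotesOf cmd rest := by
        simp [pvQuotesOf, hq']
      by_cases hc : c = '`'
      · subst hc
        have hT : pvTicksOf ((i, '`') :: rest) = i :: pvTicksOf rest := by
          simp [pvTicksOf]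
        constructor
        · -- state false: unquoted backtick, A returns true
          show pvALoop cmd ((i, '`') :: rest) false none = _
          rw [pvALoop]
          simp only [hq', Bool.false_eq_true, if_false, Bool.not_false, Bool.and_true,
            beq_self_eq_true, if_true]
          rw [hQ, hT]
          symm
          rw [List.any_cons]
          have : pvAllOut n (pvQuotesOf cmd rest) i = true := by
            apply pvAllOut_of_lt
            intro p hm
            exact hlt p (List.mem_of_mem_filter hm)
          rw [this]; rfl
        · -- state true: backtick inside quotes, skipped
          intro q
          show pvALoop cmd ((i, '`') :: rest) true (some q) = _
          rw [pvALoop]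
          simp only [hq', Bool.false_eq_true, if_false, Bool.not_true, Bool.and_false,
            if_false]
          rw [hQ, hT, ihB q]
          cases hsc : pvSplitClose q (pvQuotesOf cmd rest) with
          | none => rfl
          | some cr =>
            obtain ⟨close, qr⟩ := cr
            simp only [List.any_cons]
            have hclosem : (close, q) ∈ rest :=
              List.mem_of_mem_filter (pvSplitClose_mem q _ _ _ hsc).1
            have : decide (close < i) = false := by
              have := hlt _ hclosem
              simp only [decide_eq_false_iff_not]; omega
            rw [this]
            simp
      · -- ordinary character
        have hT : pvTicksOf ((i, c) :: rest) = pvTicksOf rest := by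
          simp [pvTicksOf, hc]
        have hcb : (c == '`') = false := beq_eq_false_iff_ne.mpr hc
        constructor
        · show pvALoop cmd ((i, c) :: rest) false none = _
          rw [pvALoop]
          simp only [hq', Bool.false_eq_true, if_false, hcb, Bool.false_and, if_false]
          rw [hQ, hT]; exact ihA
        · intro q
          show pvALoop cmd ((i, c) :: rest) true (some q) = _
          rw [pvALoop]
          simp only [hq', Bool.false_eq_true, if_false, hcb, Bool.false_and, if_false]
          rw [hQ, hT]; exact ihB q

-- '`' in command (as Python substring test) iff '`' is one of command's characters
theorem pv_isIn_backtick_iff (l : List Char) :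
    PySem.Chars.isIn ['`'] l = true ↔ '`' ∈ l := by
  rw [PySem.Chars.isIn_iff_infix]
  exact List.singleton_infix_iff '`' l

-- no backtick in the command means no ticks collected
theorem pv_ticks_nil {l : List Char} (h : '`' ∉ l) :
    pvTicksOf (PySem.List.enumerate l) = [] := by
  rw [pvTicksOf, List.map_eq_nil_iff, List.filter_eq_nil_iff]
  intro p hp
  have : p.2 ∈ l := by
    have := List.mem_map_of_mem (f := (·.2)) hp
    rwa [PySem.List.map_snd_enumerate] at this
  simp only [beq_iff_eq]
  intro hc
  exact h (hc ▸ this)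

-- the boolean glue: A's nested ifs against B's single disjunction
theorem pv_combine (d b l g r : Bool) (h : b = false → r = false) :
    (if d then true else if b then (if r then true else (l || g)) else (l || g))
      = (if d || l || g then true else r) := by
  cases d <;> cases b <;> cases l <;> cases g <;> cases r <;> simp_all

-- ===== VERDICT (by name: the statement is the Claim_ definition above) =====
theorem needs_powershell_py_spec : Claim_equal_needs_powershell_py := by
  intro command _
  show needs_powershell_py command = needs_powershell_py_alt command
  unfold needs_powershell_py needs_powershell_py_alt
  have hmain :=
    pvMain command.toList (command.toList.length : Int) (PySem.List.enumerate command.toList)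
      (PySem.List.pairwise_lt_enumerate command.toList 0)
      (by
        intro p hp
        obtain ⟨k, hk, rfl⟩ := (PySem.List.mem_enumerate_iff _ _ _).mp hp
        simp only [Int.zero_add]
        exact_mod_cast hk)
  rw [hmain.1]
  simp only [PySem.Str.isIn_eq]
  exact pv_combine _ _ _ _ _
    (fun hb => by
      have hnot : '`' ∉ command.toList := by
        intro hm
        have h1 := (pv_isIn_backtick_iff command.toList).mpr hm
        have hb' : PySem.Chars.isIn ['`'] command.toList = false := hb
        rw [h1] at hb'
        cases hb'
      rw [pv_ticks_nil hnot]
      rfl)
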